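-- pv_equiv track=rewrite | github.com/IvanLyovkin/CodewarsKatas | 4 kyu/The fusc function -- Part 2.py | fusc
-- ===== SOURCE A (Python) =====
-- def fusc(n):
--     a, b = 0, 1
--     while n > 0:
--         if n & 1:
--             a += b
--         else:
--             b += a
--         n >>= 1
--     return a
-- ===== SOURCE B (Python) =====
-- def fusc(n):
--     # top-down pair recursion on the fusc identities:
--     # pair(m) = (fusc(m), fusc(m+1)); fusc(2k)=fusc(k), fusc(2k+1)=fusc(k)+fusc(k+1)
--     def pair(m):
--         if m <= 0:
--             return (0, 1)
--         x, y = pair(m >> 1)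
--         return (x + y, y) if m & 1 else (x, x + y)
--     return pair(n)[0] if n > 0 else 0
-- ===== Notes on version B (the rewrite author's own statement) =====
-- stated objective: alternative
-- what changed: Replaces A's bottom-up bit loop with two running accumulators by a top-down recursion on the halved argument computing the pair (fusc(m), fusc(m+1)) from the Stern-Brocot identities.
import Mathlib
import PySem

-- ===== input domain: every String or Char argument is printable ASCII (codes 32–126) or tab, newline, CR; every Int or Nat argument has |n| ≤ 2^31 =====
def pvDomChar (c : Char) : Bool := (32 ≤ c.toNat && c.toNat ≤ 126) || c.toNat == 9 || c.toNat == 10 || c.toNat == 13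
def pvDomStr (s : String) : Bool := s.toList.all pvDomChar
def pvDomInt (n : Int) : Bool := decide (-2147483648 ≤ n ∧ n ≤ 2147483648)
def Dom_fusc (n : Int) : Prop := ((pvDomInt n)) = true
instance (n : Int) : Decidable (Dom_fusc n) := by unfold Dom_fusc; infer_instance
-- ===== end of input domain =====

-- B replaces A's bottom-up bit loop (two accumulators) by a top-down pair recursion on the halved argument; same cost, different decomposition.

-- termination helper for both ports: n >> 1 shrinks a positive n
theorem pvHalfLt (n : Int) (h : 0 < n) : (PySem.Int.floordiv n 2).toNat < n.toNat := by
  simp only [PySem.Int.floordiv, Int.fdiv_eq_ediv]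
  omega

-- ===== PORT A =====
-- the while-loop of A: state (n, a, b), n halves each step
def fuscLoop (n a b : Int) : Int :=
  if h : 0 < n then
    if PySem.Int.mod n 2 = 1 then fuscLoop (PySem.Int.floordiv n 2) (a + b) b
    else fuscLoop (PySem.Int.floordiv n 2) a (a + b)
  else a
termination_by n.toNat
decreasing_by all_goals exact pvHalfLt n h

def fusc (n : Int) : Int := fuscLoop n 0 1

-- ===== PORT B =====
-- pair m = (fusc m, fusc (m+1)) by recursion on m >> 1 (Source B's inner helper)
def pairFusc (m : Int) : Int × Int :=
  if h : m ≤ 0 then (0, 1)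
  else
    let p := pairFusc (PySem.Int.floordiv m 2)
    if PySem.Int.mod m 2 = 1 then (p.1 + p.2, p.2) else (p.1, p.1 + p.2)
termination_by m.toNat
decreasing_by exact pvHalfLt m (by omega)

def fusc_alt (n : Int) : Int := if 0 < n then (pairFusc n).1 else 0

-- ===== PRECONDITION & SPEC =====
def Spec_fusc (n : Int) (out : Int) : Prop := out = fusc_alt n
instance (n : Int) (out : Int) : Decidable (Spec_fusc n out) := by unfold Spec_fusc; infer_instance

-- ===== CLAIM (what is proved, stated in full; the proofs are below) =====
def Claim_equal_fusc : Prop := ∀ (n : Int), Dom_fusc n → Spec_fusc n (fusc n)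

-- ===== LEMMAS AND PROOFS =====

-- loop invariant: fuscLoop n a b = a * snd(pair n) + b * fst(pair n)
theorem fuscLoop_pair (k : Nat) : ∀ (n a b : Int), n.toNat ≤ k →
    fuscLoop n a b = a * (pairFusc n).2 + b * (pairFusc n).1 := by
  induction k with
  | zero =>
    intro n a b hk
    have hn : n ≤ 0 := by omega
    rw [fuscLoop.eq_def, pairFusc.eq_def]
    simp [hn, not_lt.mpr hn]
  | succ k ih =>
    intro n a b hk
    by_cases hpos : 0 < n
    · have hhalf : (PySem.Int.floordiv n 2).toNat ≤ k := by
        have := pvHalfLt n hpos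
        omega
      rw [fuscLoop.eq_def, pairFusc.eq_def]
      simp only [dif_pos hpos, dif_neg (not_le.mpr hpos)]
      by_cases hodd : PySem.Int.mod n 2 = 1
      · simp only [if_pos hodd]
        rw [ih _ _ _ hhalf]; ring
      · simp only [if_neg hodd]
        rw [ih _ _ _ hhalf]; ring
    · have hn : n ≤ 0 := by omega
      rw [fuscLoop.eq_def, pairFusc.eq_def]
      simp [hn, hpos]

-- ===== VERDICT (by name: the statement is the Claim_ definition above) =====
theorem fusc_spec : Claim_equal_fusc := by
  intro n _
  unfold Spec_fusc fusc fusc_alt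
  rw [fuscLoop_pair n.toNat n 0 1 (le_refl _)]
  by_cases hpos : 0 < n
  · simp [hpos]
  · have hn : n ≤ 0 := by omega
    rw [pairFusc.eq_def]
    simp [hn, hpos]
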